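-- pv_equiv track=rewrite | github.com/tehnix53/Fluorography-Cardio-Index-Analysis | cardio_torax_index.py | left_heart
-- ===== SOURCE A (Python) =====
-- def where_center_is(array):
--     i = 0
--     for element in array:
--         if element == 0:
--             i += 1
--         else:
--             break
--     n=0
--     for element in array[i:len(array)]:
--         if element == 1:
--             n+=1
--         else:
--             break
--     j = 0
--     for element in reversed(array):
--         if element == 0:
--             j+=1
--         else:
--             break
--     k = 0
--     for element in reversed(array[0:len(array)-j]):
--         if element == 1:
--                 k+=1
--         else:
--             break
--     return (i+n)+(int(len(array))-(j+k)-(i+n))/2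
--
-- def left_heart(matrix):
--     n = []
--     m = 0
--     for element in matrix:
--         m = 0
--         # for i in reversed(element[0:len(element)/2]):
--         for i in reversed(element[0:int(where_center_is(matrix[0]))]):
--             if i == 0:
--                 m += 1
--             else:
--                 n += [m]
--                 m = 0
--                 break
--     return n
-- ===== SOURCE B (Python) =====
-- def _edge(seq):
--     """Length of the initial run of zeros followed by a run of ones."""
--     n = 0
--     state = 0
--     for v in seq:
--         if state == 0 and v == 0:
--             n += 1
--         elif v == 1:
--             n += 1
--             state = 1
--         else:
--             break
--     return n
--
--
-- def left_heart(matrix):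
--     res = []
--     if matrix:
--         first = matrix[0]
--         center = (_edge(first) + len(first) - _edge(first[::-1])) // 2
--         for row in matrix:
--             seg = row[:center]
--             last = -1
--             for idx, v in enumerate(seg):
--                 if v != 0:
--                     last = idx
--             if last >= 0:
--                 res.append(len(seg) - 1 - last)
--     return res
-- ===== Notes on version B (the rewrite author's own statement) =====
-- stated objective: simpler
-- what changed: B computes the center once before the loop with a single two-state prefix-run helper used on the first row and its reverse (replacing A's four break-loops re-run on every iteration), and scans each left segment forward recording the last nonzero index instead of A's reversed zero-counting with break.
import Mathlib
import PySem

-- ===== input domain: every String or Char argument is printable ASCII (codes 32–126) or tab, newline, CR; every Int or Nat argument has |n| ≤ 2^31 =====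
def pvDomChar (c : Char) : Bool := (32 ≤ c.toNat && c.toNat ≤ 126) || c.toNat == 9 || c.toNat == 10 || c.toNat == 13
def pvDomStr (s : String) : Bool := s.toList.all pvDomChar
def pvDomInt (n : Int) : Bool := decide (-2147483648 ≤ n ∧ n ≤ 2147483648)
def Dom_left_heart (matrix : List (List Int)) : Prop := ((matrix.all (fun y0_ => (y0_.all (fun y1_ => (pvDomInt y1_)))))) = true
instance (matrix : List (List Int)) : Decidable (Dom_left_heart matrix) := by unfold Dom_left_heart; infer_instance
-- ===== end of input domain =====

-- B computes the center once with one two-state prefix-run helper (run on the first row and its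
-- reverse) and scans each left segment forward tracking the last nonzero index, instead of A's
-- four break-loops recomputed per row and reversed zero-counting; objective: simpler.


-- ===== PORT A =====
-- 'for element in …: if element == 0: i += 1 else: break' — leading-zero count (a count, so Nat)
def czerosA : List Int → Nat
  | [] => 0
  | x :: xs => if x = 0 then czerosA xs + 1 else 0

-- same break-loop counting leading ones
def conesA : List Int → Nat
  | [] => 0
  | x :: xs => if x = 1 then conesA xs + 1 else 0

-- TWICE the float returned by where_center_is; the float (i+n) + (len-(j+k)-(i+n))/2 is an exact
-- nonnegative half-integer for these small counts, so int() of it is floordiv of this value by 2.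
def whereCenterIs2 (array : List Int) : Int :=
  let i := czerosA array                                 -- leading zeros
  let n := conesA (array.drop i)                         -- ones in array[i:len(array)]
  let j := czerosA array.reverse                         -- zeros in reversed(array)
  let k := conesA ((array.take (array.length - j)).reverse)  -- ones in reversed(array[0:len-j])
  2 * ((i : Int) + n) + ((array.length : Int) - ((j : Int) + k) - ((i : Int) + n))

-- inner 'for i in reversed(…): if i == 0: m += 1 else: append m; break'
def innerA : List Int → Int → Option Int
  | [], _ => none
  | x :: xs, m => if x = 0 then innerA xs (m + 1) else some m

def left_heart (matrix : List (List Int)) : List Int :=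
  matrix.foldl (fun n row =>
    -- int(where_center_is(matrix[0])): matrix is nonempty whenever the loop body runs, so headD is exact
    let c := PySem.Int.floordiv (whereCenterIs2 (matrix.headD [])) 2
    match innerA (PySem.List.slice row (some 0) (some c)).reverse 0 with
    | some m => n ++ [m]
    | none => n) []

-- ===== PORT B =====
-- _edge: single pass, state 0 = in the zero run, state 1 = in the one run
def edgeGo : List Int → Int → Int → Int
  | [], n, _ => n
  | v :: vs, n, state =>
    if state = 0 ∧ v = 0 then edgeGo vs (n + 1) state
    else if v = 1 then edgeGo vs (n + 1) 1
    else n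

def edgeB (seq : List Int) : Int := edgeGo seq 0 0

-- 'for idx, v in enumerate(seg): if v != 0: last = idx'
def lastNZ : List Int → Int → Int → Int
  | [], _, last => last
  | v :: vs, idx, last => lastNZ vs (idx + 1) (if v ≠ 0 then idx else last)

def left_heart_alt (matrix : List (List Int)) : List Int :=
  match matrix with
  | [] => []
  | first :: _ =>
    -- first[::-1] is first.reverse (PySem.List.slice?_none_none_neg_one)
    let c := PySem.Int.floordiv (edgeB first + (first.length : Int) - edgeB first.reverse) 2
    matrix.foldl (fun res row =>
      let seg := PySem.List.slice row none (some c)      -- row[:center]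
      let last := lastNZ seg 0 (-1)
      if last ≥ 0 then res ++ [(seg.length : Int) - 1 - last] else res) []

-- ===== PRECONDITION & SPEC =====
def Spec_left_heart (matrix : List (List Int)) (out : List Int) : Prop := out = left_heart_alt matrix
instance (matrix : List (List Int)) (out : List Int) : Decidable (Spec_left_heart matrix out) := by unfold Spec_left_heart; infer_instance

-- ===== CLAIM (what is proved, stated in full; the proofs are below) =====
def Claim_equal_left_heart : Prop := ∀ (matrix : List (List Int)), Dom_left_heart matrix → Spec_left_heart matrix (left_heart matrix)

-- ===== LEMMAS AND PROOFS =====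

theorem czerosA_lt (xs : List Int) (h : ∃ x ∈ xs, x ≠ 0) : czerosA xs < xs.length := by
  induction xs with
  | nil => simp at h
  | cons x xs ih =>
    simp only [czerosA, List.length_cons]
    by_cases hx : x = 0
    · rw [if_pos hx]
      have hex : ∃ y ∈ xs, y ≠ 0 := by
        rcases h with ⟨y, hy, hyne⟩
        rcases List.mem_cons.mp hy with h1 | h1
        · exact absurd (h1 ▸ hx) hyne
        · exact ⟨y, h1, hyne⟩
      have := ih hex; omega
    · rw [if_neg hx]; omega

theorem czerosA_append (as bs : List Int) :
    czerosA (as ++ bs) =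
      if ∀ a ∈ as, a = 0 then as.length + czerosA bs else czerosA as := by
  induction as with
  | nil => simp
  | cons a as ih =>
    simp only [List.cons_append, czerosA, List.length_cons]
    by_cases ha : a = 0
    · rw [if_pos ha, ih]
      by_cases hall : ∀ x ∈ as, x = 0
      · have hall' : ∀ x ∈ a :: as, x = 0 := by
          intro x hx
          rcases List.mem_cons.mp hx with h1 | h1
          · exact h1 ▸ ha
          · exact hall x h1
        rw [if_pos hall, if_pos hall']; omega
      · have hall' : ¬ ∀ x ∈ a :: as, x = 0 :=
          fun hc => hall (fun x hx => hc x (List.mem_cons_of_mem _ hx))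
        rw [if_neg hall, if_neg hall', if_pos ha]
    · have hall' : ¬ ∀ x ∈ a :: as, x = 0 := fun hc => ha (hc a List.mem_cons_self)
      rw [if_neg ha, if_neg hall', if_neg ha]

theorem edgeGo_one (vs : List Int) (n : Int) : edgeGo vs n 1 = n + conesA vs := by
  induction vs generalizing n with
  | nil => simp [edgeGo, conesA]
  | cons v vs ih =>
    simp only [edgeGo, conesA]
    rw [if_neg (fun h => absurd h.1 one_ne_zero)]
    by_cases hv : v = 1
    · rw [if_pos hv, ih, if_pos hv]; push_cast; ring
    · rw [if_neg hv, if_neg hv]; simp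

theorem edgeGo_zero (vs : List Int) (n : Int) :
    edgeGo vs n 0 = n + czerosA vs + conesA (vs.drop (czerosA vs)) := by
  induction vs generalizing n with
  | nil => simp [edgeGo, czerosA, conesA]
  | cons v vs ih =>
    simp only [edgeGo, czerosA, true_and]
    by_cases hv : v = 0
    · rw [if_pos hv, ih, if_pos hv]
      simp only [List.drop_succ_cons]; push_cast; ring
    · rw [if_neg hv, if_neg hv]
      by_cases h1 : v = 1
      · rw [if_pos h1, edgeGo_one, List.drop_zero, conesA, if_pos h1]; push_cast; ring
      · rw [if_neg h1, List.drop_zero, conesA, if_neg h1]; simp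

theorem center_eq (arr : List Int) :
    whereCenterIs2 arr = edgeB arr + (arr.length : Int) - edgeB arr.reverse := by
  have h1 : edgeB arr = (czerosA arr : Int) + conesA (arr.drop (czerosA arr)) := by
    rw [edgeB, edgeGo_zero]; ring
  have h2 : edgeB arr.reverse =
      (czerosA arr.reverse : Int) +
        conesA ((arr.take (arr.length - czerosA arr.reverse)).reverse) := by
    rw [edgeB, edgeGo_zero, List.drop_reverse]; ring
  rw [whereCenterIs2, h1, h2]; ring

theorem innerA_all_zero (xs : List Int) (m : Int) (h : ∀ x ∈ xs, x = 0) : innerA xs m = none := by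
  induction xs generalizing m with
  | nil => rfl
  | cons x xs ih =>
    simp only [innerA, if_pos (h x List.mem_cons_self)]
    exact ih _ (fun y hy => h y (List.mem_cons_of_mem _ hy))

theorem innerA_ex (xs : List Int) (m : Int) (h : ∃ x ∈ xs, x ≠ 0) :
    innerA xs m = some (m + czerosA xs) := by
  induction xs generalizing m with
  | nil => simp at h
  | cons x xs ih =>
    simp only [innerA, czerosA]
    by_cases hx : x = 0
    · have hex : ∃ y ∈ xs, y ≠ 0 := by
        rcases h with ⟨y, hy, hyne⟩
        rcases List.mem_cons.mp hy with h1 | h1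
        · exact absurd (h1 ▸ hx) hyne
        · exact ⟨y, h1, hyne⟩
      rw [if_pos hx, ih _ hex, if_pos hx]
      congr 1; push_cast; ring
    · rw [if_neg hx, if_neg hx]; simp

theorem lastNZ_all_zero (xs : List Int) (i l : Int) (h : ∀ x ∈ xs, x = 0) : lastNZ xs i l = l := by
  induction xs generalizing i l with
  | nil => rfl
  | cons x xs ih =>
    simp only [lastNZ, if_neg (not_not.mpr (h x List.mem_cons_self))]
    exact ih _ _ (fun y hy => h y (List.mem_cons_of_mem _ hy))

theorem lastNZ_ex (xs : List Int) (i l : Int) (h : ∃ x ∈ xs, x ≠ 0) :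
    lastNZ xs i l = i + ((xs.length : Int) - 1 - czerosA xs.reverse) := by
  induction xs generalizing i l with
  | nil => simp at h
  | cons x xs ih =>
    simp only [lastNZ, List.reverse_cons, czerosA_append, List.length_cons]
    by_cases hex : ∃ y ∈ xs, y ≠ 0
    · have hrev : ¬ ∀ a ∈ xs.reverse, a = 0 := by
        intro hc; rcases hex with ⟨y, hy, hyne⟩
        exact hyne (hc y (List.mem_reverse.mpr hy))
      rw [ih _ _ hex, if_neg hrev]
      have hlt : czerosA xs.reverse < xs.length := by
        have h' := czerosA_lt xs.reverse (by
          rcases hex with ⟨y, hy, hyne⟩; exact ⟨y, List.mem_reverse.mpr hy, hyne⟩)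
        rwa [List.length_reverse] at h'
      push_cast; omega
    · push Not at hex
      have hx : x ≠ 0 := by
        rcases h with ⟨y, hy, hyne⟩
        rcases List.mem_cons.mp hy with h1 | h1
        · exact h1 ▸ hyne
        · exact absurd (hex y h1) hyne
      rw [if_pos hx, lastNZ_all_zero _ _ _ hex,
        if_pos (fun a ha => hex a (List.mem_reverse.mp ha)),
        List.length_reverse]
      simp only [czerosA, if_neg hx]
      omega

theorem row_eq (seg : List Int) :
    (match innerA seg.reverse 0 with
     | some m => [m]
     | none => ([] : List Int)) =
    (if lastNZ seg 0 (-1) ≥ 0 then [(seg.length : Int) - 1 - lastNZ seg 0 (-1)] else []) := by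
  by_cases h : ∃ x ∈ seg, x ≠ 0
  · have hrev : ∃ x ∈ seg.reverse, x ≠ 0 := by
      rcases h with ⟨y, hy, hyne⟩; exact ⟨y, List.mem_reverse.mpr hy, hyne⟩
    have hlt : czerosA seg.reverse < seg.length := by
      have h' := czerosA_lt seg.reverse hrev
      rwa [List.length_reverse] at h' 
    rw [innerA_ex _ _ hrev, lastNZ_ex _ _ _ h]
    rw [if_pos (by omega)]
    simp only [List.cons.injEq, and_true]
    ring
  · push Not at h
    rw [innerA_all_zero _ _ (fun x hx => h x (List.mem_reverse.mp hx)),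
      lastNZ_all_zero _ _ _ h]
    norm_num

-- ===== VERDICT (by name: the statement is the Claim_ definition above) =====
theorem left_heart_spec : Claim_equal_left_heart := by
  intro matrix _
  show left_heart matrix = left_heart_alt matrix
  cases matrix with
  | nil => rfl
  | cons first rest =>
    simp only [left_heart, left_heart_alt, List.headD_cons]
    have hc : PySem.Int.floordiv (whereCenterIs2 first) 2 =
        PySem.Int.floordiv (edgeB first + (first.length : Int) - edgeB first.reverse) 2 := by
      rw [center_eq]
    apply PySem.List.foldl_congr_mem
    intro n row _
    rw [hc, PySem.List.slice_zero_start]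
    set c := PySem.Int.floordiv (edgeB first + (first.length : Int) - edgeB first.reverse) 2 with hcdef
    set seg := PySem.List.slice row none (some c) with hseg
    have hrow := row_eq seg
    cases hinner : innerA seg.reverse 0 with
    | none =>
      rw [hinner] at hrow
      by_cases hge : lastNZ seg 0 (-1) ≥ 0
      · rw [if_pos hge] at hrow; exact absurd hrow (by simp)
      · rw [if_neg hge]
    | some m =>
      rw [hinner] at hrow
      by_cases hge : lastNZ seg 0 (-1) ≥ 0
      · rw [if_pos hge] at hrow ⊢
        simp only [List.cons.injEq, and_true] at hrow
        rw [hrow]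
      · rw [if_neg hge] at hrow; exact absurd hrow (by simp)
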